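-- pv_equiv track=rewrite | github.com/Belegkarnil/distributed-deep-learning | src/pytorch/MLP/model.py | model_partition
-- ===== SOURCE A (Python) =====
-- def model_partition(layers,ndevices):
--     step,rest = layers//ndevices, layers % ndevices
--     shift = 1 if(rest > 1)else 0
--     last = rest - shift
--     first = ndevices-last
--     sep_layer = first*step+shift
--     #
--     split = {0:0}
--     #
--     for layerID in range(shift,sep_layer):
--         split[layerID] = (layerID-shift)//step
--     step += 1
--     for layerID in range(sep_layer,layers):
--         split[layerID] = first + (layerID-sep_layer)//step
--     return split
-- ===== SOURCE B (Python) =====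
-- def _assign_block(split, layer, dev, size):
--     for _ in range(size):
--         split[layer] = dev
--         layer += 1
--     return layer
--
--
-- def model_partition(layers, ndevices):
--     step, rest = divmod(layers, ndevices)
--     shift = 1 if rest > 1 else 0
--     last = rest - shift
--     first = ndevices - last
--     # consecutive groups of devices, each device in a group getting the same
--     # number of consecutive layers: device 0, then the remaining 'small'
--     # devices, then the 'large' devices holding one extra layer.
--     split = {0: 0}
--     layer = 0
--     dev = 0
--     for count, size in ((1, step + shift), (first - 1, step), (last, step + 1)):
--         if size > 0:
--             for _ in range(count):
--                 layer = _assign_block(split, layer, dev, size)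
--                 dev += 1
--         else:
--             dev += count
--     return split
-- ===== Notes on version B (the rewrite author's own statement) =====
-- stated objective: alternative
-- what changed: Instead of computing each layer's device by a floor division inside two per-layer loops, B precomputes the three consecutive device groups (device 0, the remaining small devices, the large devices) with their per-device block size and assigns consecutive layer-ID blocks to consecutive devices, skipping empty groups.
-- outside the precondition, e.g. on model_partition(3, -2): A returns {0: 0, 1: -1, 2: -1}, B returns {0: 0}; on model_partition(5, -3): A returns {0: 0, 1: -1, 2: -1, 3: -2, 4: -2}, B returns {0: 0}
import Mathlib
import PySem

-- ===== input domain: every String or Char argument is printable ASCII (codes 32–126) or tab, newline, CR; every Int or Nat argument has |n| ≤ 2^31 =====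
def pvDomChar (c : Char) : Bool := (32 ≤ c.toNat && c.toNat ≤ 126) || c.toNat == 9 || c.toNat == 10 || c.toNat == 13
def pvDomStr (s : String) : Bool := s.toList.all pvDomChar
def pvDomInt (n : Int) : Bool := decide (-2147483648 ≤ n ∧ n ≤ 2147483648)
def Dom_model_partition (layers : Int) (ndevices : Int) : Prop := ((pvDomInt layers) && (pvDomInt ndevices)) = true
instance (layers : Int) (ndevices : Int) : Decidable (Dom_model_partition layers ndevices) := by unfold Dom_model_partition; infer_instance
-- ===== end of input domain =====

-- B assigns consecutive layer-ID blocks to three consecutive device groups instead of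
-- computing each layer's device by a per-layer floor division (alternative decomposition,
-- same cost); equivalence is proved on the natural domain ndevices ≥ 1.

-- ===== PORT A =====
def model_partition (layers : Int) (ndevices : Int) : List (Int × Int) :=
  let step := PySem.Int.floordiv layers ndevices
  let rest := PySem.Int.mod layers ndevices
  let shift : Int := if rest > 1 then 1 else 0
  let last := rest - shift
  let first := ndevices - last
  let sep_layer := first * step + shift
  let split : PySem.Dict Int Int := PySem.Dict.ofList [(0, 0)]
  let split := (PySem.List.pyRange shift sep_layer 1).foldl
      (fun d layerID => d.insert layerID (PySem.Int.floordiv (layerID - shift) step)) split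
  let step := step + 1
  let split := (PySem.List.pyRange sep_layer layers 1).foldl
      (fun d layerID => d.insert layerID (first + PySem.Int.floordiv (layerID - sep_layer) step)) split
  split.items

-- ===== PORT B =====
-- helper _assign_block of Source B: assign `size` consecutive layer IDs (from `layer`) to device `dev`
def pvAssignBlock (split : PySem.Dict Int Int) (layer : Int) (dev : Int) (size : Int) :
    PySem.Dict Int Int × Int :=
  (PySem.List.pyRange 0 size 1).foldl
    (fun (p : PySem.Dict Int Int × Int) _ => (p.1.insert p.2 dev, p.2 + 1)) (split, layer)

def model_partition_alt (layers : Int) (ndevices : Int) : List (Int × Int) :=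
  let step := PySem.Int.floordiv layers ndevices
  let rest := PySem.Int.mod layers ndevices
  let shift : Int := if rest > 1 then 1 else 0
  let last := rest - shift
  let first := ndevices - last
  let st :=
    [((1 : Int), step + shift), (first - 1, step), (last, step + 1)].foldl
      (fun (st : PySem.Dict Int Int × Int × Int) (g : Int × Int) =>
        if g.2 > 0 then
          (PySem.List.pyRange 0 g.1 1).foldl
            (fun (st2 : PySem.Dict Int Int × Int × Int) (_ : Int) =>
              ((pvAssignBlock st2.1 st2.2.1 st2.2.2 g.2).1,
               (pvAssignBlock st2.1 st2.2.1 st2.2.2 g.2).2,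
               st2.2.2 + 1)) st
        else (st.1, st.2.1, st.2.2 + g.1))
      (PySem.Dict.ofList [(0, 0)], 0, 0)
  st.1.items

-- ===== PRECONDITION & SPEC =====
-- Pre_ restricts to the natural domain of positive device counts: ndevices = 0 raises
-- ZeroDivisionError in A, and a negative device count is malformed input (A then returns
-- negative device ids, which B does not reproduce).
def Pre_model_partition (layers : Int) (ndevices : Int) : Prop := 1 ≤ ndevices
instance (layers : Int) (ndevices : Int) : Decidable (Pre_model_partition layers ndevices) := by
  unfold Pre_model_partition; infer_instance

def pvWitness_model_partition : Int × Int := (7, 3)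

def Spec_model_partition (layers : Int) (ndevices : Int) (out : List (Int × Int)) : Prop :=
  out = model_partition_alt layers ndevices
instance (layers : Int) (ndevices : Int) (out : List (Int × Int)) :
    Decidable (Spec_model_partition layers ndevices out) := by
  unfold Spec_model_partition; infer_instance

-- ===== CLAIM (what is proved, stated in full; the proofs are below) =====
def Claim_equal_model_partition : Prop := ∀ (layers : Int) (ndevices : Int),
  Dom_model_partition layers ndevices → Pre_model_partition layers ndevices →
  Spec_model_partition layers ndevices (model_partition layers ndevices)

-- ===== LEMMAS AND PROOFS =====

-- run a list of (key, value) insertions through a dict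
def pvIns (d : PySem.Dict Int Int) (ops : List (Int × Int)) : PySem.Dict Int Int :=
  ops.foldl (fun d p => d.insert p.1 p.2) d

theorem pvIns_map (r : List Int) (f : Int → Int) (d : PySem.Dict Int Int) :
    pvIns d (r.map (fun i => (i, f i))) = r.foldl (fun d i => d.insert i (f i)) d := by
  simp [pvIns, List.foldl_map]

theorem pvIns_append (d : PySem.Dict Int Int) (l1 l2 : List (Int × Int)) :
    pvIns d (l1 ++ l2) = pvIns (pvIns d l1) l2 := by
  simp [pvIns, List.foldl_append]

theorem pv_fdiv_zero {x s : Int} (hs : 0 < s) (h1 : 0 ≤ x) (h2 : x < s) :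
    PySem.Int.floordiv x s = 0 := by
  rw [PySem.Int.floordiv_eq_ediv_of_pos hs]
  exact Int.ediv_eq_zero_of_lt h1 h2

theorem pv_fdiv_shift {s : Int} (hs : 0 < s) (x : Int) :
    PySem.Int.floordiv (x + s) s = PySem.Int.floordiv x s + 1 := by
  rw [PySem.Int.floordiv_eq_ediv_of_pos hs, PySem.Int.floordiv_eq_ediv_of_pos hs]
  have := Int.add_mul_ediv_right x 1 (ne_of_gt hs)
  simpa using this

theorem pvAssignBlock_aux (dev : Int) (l : List Int) :
    ∀ (d : PySem.Dict Int Int) (L : Int),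
    l.foldl (fun (p : PySem.Dict Int Int × Int) _ => (p.1.insert p.2 dev, p.2 + 1)) (d, L)
      = (pvIns d ((PySem.List.pyRange L (L + (l.length : Int)) 1).map (fun i => (i, dev))),
         L + (l.length : Int)) := by
  induction l with
  | nil => intro d L; simp [pvIns, PySem.List.pyRange_one_eq_nil]
  | cons a t ih =>
    intro d L
    simp only [List.foldl_cons, List.length_cons]
    rw [ih]
    have hr : PySem.List.pyRange L (L + ((t.length : Int) + 1)) 1
        = L :: PySem.List.pyRange (L + 1) (L + ((t.length : Int) + 1)) 1 :=
      PySem.List.pyRange_one_cons (by omega)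
    push_cast
    have harith : L + 1 + (t.length : Int) = L + ((t.length : Int) + 1) := by ring
    rw [harith, hr]
    simp [pvIns]

theorem pvAssignBlock_pos (d : PySem.Dict Int Int) (L dev : Int) {s : Int} (hs : 0 ≤ s) :
    pvAssignBlock d L dev s
      = (pvIns d ((PySem.List.pyRange L (L + s) 1).map (fun i => (i, dev))), L + s) := by
  unfold pvAssignBlock
  rw [pvAssignBlock_aux dev (PySem.List.pyRange 0 s 1) d L]
  rw [PySem.List.length_pyRange_one]
  have hcast : (((s - 0).toNat : Int)) = s := by omega
  rw [hcast]

-- the middle loop `for _ in range(count)` of B, for a positive block size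
theorem pvOuter (s : Int) (hs : 0 < s) (l : List Int) :
    ∀ (d : PySem.Dict Int Int) (L dev : Int),
    l.foldl
      (fun (st2 : PySem.Dict Int Int × Int × Int) (_ : Int) =>
        ((pvAssignBlock st2.1 st2.2.1 st2.2.2 s).1,
         (pvAssignBlock st2.1 st2.2.1 st2.2.2 s).2,
         st2.2.2 + 1)) (d, L, dev)
      = (pvIns d ((PySem.List.pyRange L (L + (l.length : Int) * s) 1).map
            (fun i => (i, dev + PySem.Int.floordiv (i - L) s))),
         L + (l.length : Int) * s, dev + (l.length : Int)) := by
  induction l with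
  | nil => intro d L dev; simp [pvIns, PySem.List.pyRange_one_eq_nil]
  | cons a t ih =>
    intro d L dev
    have hn : (0 : Int) ≤ (t.length : Int) * s := by positivity
    simp only [List.foldl_cons]
    rw [pvAssignBlock_pos d L dev (le_of_lt hs)]
    simp only []
    rw [ih]
    have hsplit : PySem.List.pyRange L (L + ((t.length : Int) + 1) * s) 1
        = PySem.List.pyRange L (L + s) 1
          ++ PySem.List.pyRange (L + s) (L + ((t.length : Int) + 1) * s) 1 := by
      apply PySem.List.pyRange_one_append <;> nlinarith
    have h1 : (PySem.List.pyRange L (L + s) 1).map (fun i => (i, dev))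
        = (PySem.List.pyRange L (L + s) 1).map
            (fun i => (i, dev + PySem.Int.floordiv (i - L) s)) := by
      apply List.map_congr_left
      intro i hi
      rw [PySem.List.mem_pyRange_one] at hi
      rw [pv_fdiv_zero hs (by omega) (by omega)]
      simp
    have h2 : (PySem.List.pyRange (L + s) (L + s + (t.length : Int) * s) 1).map
          (fun i => (i, dev + 1 + PySem.Int.floordiv (i - (L + s)) s))
        = (PySem.List.pyRange (L + s) (L + ((t.length : Int) + 1) * s) 1).map
            (fun i => (i, dev + PySem.Int.floordiv (i - L) s)) := by
      have hb : L + s + (t.length : Int) * s = L + ((t.length : Int) + 1) * s := by ring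
      rw [hb]
      apply List.map_congr_left
      intro i hi
      have : i - L = (i - (L + s)) + s := by ring
      rw [this, pv_fdiv_shift hs]
      simp only [Prod.mk.injEq, true_and]
      ring
    simp only [List.length_cons]
    push_cast
    rw [h2, hsplit, List.map_append, ← h1, pvIns_append]
    simp only [Prod.mk.injEq]
    refine ⟨trivial, by ring, by ring⟩

theorem pv_main (layers ndevices : Int) (hnd : 0 < ndevices) :
    model_partition layers ndevices = model_partition_alt layers ndevices := by
  simp only [model_partition, model_partition_alt]
  set q := PySem.Int.floordiv layers ndevices with hq
  set r := PySem.Int.mod layers ndevices with hr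
  have hdm : q * ndevices + r = layers := PySem.Int.floordiv_mul_add_mod layers ndevices
  have hr0 : 0 ≤ r := by
    rw [hr, PySem.Int.mod_eq_emod_of_pos hnd]
    exact Int.emod_nonneg layers (by omega)
  have hrn : r < ndevices := by
    rw [hr, PySem.Int.mod_eq_emod_of_pos hnd]
    exact Int.emod_lt_of_pos layers hnd
  obtain ⟨sh, hsh01, hshr, hsh0, hsheq⟩ :
      ∃ sh : Int, (sh = 0 ∨ sh = 1) ∧ sh ≤ r ∧ 0 ≤ sh ∧ (if r > 1 then (1:Int) else 0) = sh := by
    by_cases h : r > 1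
    · exact ⟨1, Or.inr rfl, by omega, by omega, if_pos h⟩
    · exact ⟨0, Or.inl rfl, by omega, by omega, if_neg h⟩
  rw [hsheq]
  set F := ndevices - (r - sh) with hF
  have hF1 : 1 ≤ F := by omega
  have hkey : F * q + sh + (r - sh) * (q + 1) = layers := by
    rw [hF]; linear_combination hdm
  by_cases hL : layers ≤ 0
  · -- layers ≤ 0 : both sides return [(0,0)]
    have hq0 : q ≤ 0 := by
      by_contra h
      have h1 : 1 ≤ q := by omega
      nlinarith
    obtain hqq : (q ≤ -1) ∨ (q = 0 ∧ r = 0 ∧ sh = 0) := by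
      by_cases h : q = 0
      · right
        have hdm0 : r = layers := by rw [h] at hdm; linarith
        refine ⟨h, by omega, by omega⟩
      · left; omega
    have hprod : (r - sh) * (q + 1) ≤ 0 := by
      rcases hqq with h | ⟨h1, h2, h3⟩
      · nlinarith
      · rw [h2, h3]; simp
    have e1 : PySem.List.pyRange sh (F * q + sh) 1 = [] :=
      PySem.List.pyRange_one_eq_nil (by nlinarith)
    have e2 : PySem.List.pyRange (F * q + sh) layers 1 = [] :=
      PySem.List.pyRange_one_eq_nil (by linarith)
    rw [e1, e2]
    simp only [List.foldl_nil]
    rcases hqq with hq1 | ⟨hq1, hr1, hs1⟩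
    · have h1 : ¬ ((1:Int), q + sh).2 > 0 := by simp; omega
      have h2 : ¬ (F - 1, q).2 > 0 := by simp; omega
      have h3 : ¬ (r - sh, q + 1).2 > 0 := by simp; omega
      simp only [List.foldl_cons, List.foldl_nil, if_neg h1, if_neg h2, if_neg h3]
    · rw [hq1, hr1, hs1]
      norm_num
  · -- layers ≥ 1
    have hL1 : 1 ≤ layers := by omega
    have hq0 : 0 ≤ q := by
      by_contra h
      have h1 : q ≤ -1 := by omega
      nlinarith
    simp only [List.foldl_cons, List.foldl_nil]
    set d0 := PySem.Dict.ofList [((0:Int), (0:Int))] with hd0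
    -- group 1 (device 0, block size q + sh)
    have hone : PySem.List.pyRange 0 1 1 = [0] := by decide
    have hg1 : (if q + sh > 0 then
          List.foldl
            (fun (st2 : PySem.Dict Int Int × Int × Int) (_ : Int) =>
              ((pvAssignBlock st2.1 st2.2.1 st2.2.2 (q + sh)).1,
               (pvAssignBlock st2.1 st2.2.1 st2.2.2 (q + sh)).2,
               st2.2.2 + 1)) (d0, 0, 0) (PySem.List.pyRange 0 1 1)
        else (d0, 0, 0 + 1))
        = (pvIns d0 ((PySem.List.pyRange 0 (q + sh) 1).map (fun i => (i, (0:Int)))), q + sh, 1) := by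
      by_cases h : q + sh > 0
      · rw [if_pos h, hone]
        simp only [List.foldl_cons, List.foldl_nil]
        rw [pvAssignBlock_pos d0 0 0 (le_of_lt h)]
        have e : (0:Int) + (q + sh) = q + sh := by ring
        rw [e]
        norm_num
      · rw [if_neg h]
        have h0 : q + sh = 0 := by omega
        rw [PySem.List.pyRange_one_eq_nil (by omega)]
        simp [pvIns, h0]
    rw [hg1]
    dsimp only
    set D1 := pvIns d0 ((PySem.List.pyRange 0 (q + sh) 1).map (fun i => (i, (0:Int)))) with hD1
    -- group 2 (the remaining F - 1 small devices, block size q)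
    have hg2 : (if q > 0 then
          List.foldl
            (fun (st2 : PySem.Dict Int Int × Int × Int) (_ : Int) =>
              ((pvAssignBlock st2.1 st2.2.1 st2.2.2 q).1,
               (pvAssignBlock st2.1 st2.2.1 st2.2.2 q).2,
               st2.2.2 + 1)) (D1, q + sh, 1) (PySem.List.pyRange 0 (F - 1) 1)
        else (D1, q + sh, 1 + (F - 1)))
        = (pvIns D1 ((PySem.List.pyRange (q + sh) (q + sh + (F - 1) * q) 1).map
              (fun i => (i, 1 + PySem.Int.floordiv (i - (q + sh)) q))),
           q + sh + (F - 1) * q, 1 + (F - 1)) := by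
      by_cases h : q > 0
      · rw [if_pos h, pvOuter q h (PySem.List.pyRange 0 (F - 1) 1) D1 (q + sh) 1,
            PySem.List.length_pyRange_one]
        have hc : (((F - 1 - 0).toNat : Int)) = F - 1 := by omega
        rw [hc]
      · rw [if_neg h]
        have h0 : q = 0 := by omega
        rw [h0]
        norm_num
        simp [pvIns]
    rw [hg2]
    dsimp only
    set D2 := pvIns D1 ((PySem.List.pyRange (q + sh) (q + sh + (F - 1) * q) 1).map
        (fun i => (i, 1 + PySem.Int.floordiv (i - (q + sh)) q))) with hD2
    rw [if_pos (show q + 1 > 0 by omega)]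
    rw [pvOuter (q + 1) (by omega) (PySem.List.pyRange 0 (r - sh) 1) D2
        (q + sh + (F - 1) * q) (1 + (F - 1))]
    dsimp only
    rw [PySem.List.length_pyRange_one]
    have hc3 : (((r - sh - 0).toNat : Int)) = r - sh := by omega
    rw [hc3]
    have e3 : q + sh + (F - 1) * q = F * q + sh := by ring
    have e5 : (1:Int) + (F - 1) = F := by ring
    rw [e3, e5, hkey]
    rw [← pvIns_map, ← pvIns_map]
    congr 2
    rw [hD2, hD1]
    have hsplit : PySem.List.pyRange sh (F * q + sh) 1
        = PySem.List.pyRange sh (q + sh) 1 ++ PySem.List.pyRange (q + sh) (F * q + sh) 1 := by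
      apply PySem.List.pyRange_one_append
      · omega
      · nlinarith
    rw [hsplit, List.map_append, pvIns_append]
    have hpart2 : (PySem.List.pyRange (q + sh) (F * q + sh) 1).map
          (fun i => (i, PySem.Int.floordiv (i - sh) q))
        = (PySem.List.pyRange (q + sh) (q + sh + (F - 1) * q) 1).map
            (fun i => (i, 1 + PySem.Int.floordiv (i - (q + sh)) q)) := by
      rw [show q + sh + (F - 1) * q = F * q + sh by ring]
      apply List.map_congr_left
      intro i hi
      rw [PySem.List.mem_pyRange_one] at hi
      have hq1 : 0 < q := by
        by_contra hh
        have h0 : q = 0 := by omega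
        rw [h0] at hi
        simp at hi
        omega
      have hx : i - sh = (i - (q + sh)) + q := by ring
      rw [hx, pv_fdiv_shift hq1]
      simp only [Prod.mk.injEq, true_and]
      ring
    rw [hpart2]
    congr 1
    have hpart1 : (PySem.List.pyRange sh (q + sh) 1).map
          (fun i => (i, PySem.Int.floordiv (i - sh) q))
        = (PySem.List.pyRange sh (q + sh) 1).map (fun i => (i, (0:Int))) := by
      apply List.map_congr_left
      intro i hi
      rw [PySem.List.mem_pyRange_one] at hi
      have hq1 : 0 < q := by omega
      rw [pv_fdiv_zero hq1 (by omega) (by omega)]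
    rw [hpart1]
    rcases hsh01 with h | h
    · rw [h]
    · rw [h]
      have hcons : PySem.List.pyRange 0 (q + 1) 1 = 0 :: PySem.List.pyRange 1 (q + 1) 1 :=
        PySem.List.pyRange_one_cons (by omega)
      rw [hcons]
      simp only [List.map_cons, pvIns, List.foldl_cons]
      rw [show d0.insert 0 0 = d0 by rw [hd0]; decide]

-- ===== VERDICT (by name: the statement is the Claim_ definition above) =====
theorem model_partition_spec : Claim_equal_model_partition := by
  intro layers ndevices _ hpre
  unfold Spec_model_partition
  exact pv_main layers ndevices hpre
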